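-- pv_equiv track=rewrite | github.com/TejasPathak98/Data-Structure-Algorithms | 1972-rotating-the-box/rotating-the-box.py | rotateTheBox
-- ===== SOURCE A (Python) =====
-- from typing import List
--
-- def rotateTheBox(boxGrid: List[List[str]]) -> List[List[str]]:
--     m = len(boxGrid)
--     n = len(boxGrid[0])
--
--     for row in boxGrid:
--         write = n - 1
--         for col in reversed(range(n)):
--             if row[col] == "*":
--                 write = col - 1
--             elif row[col] == "#":
--                 row[col] = "."
--                 row[write] = "#"
--                 write -= 1
--
--     new_box = [[None] * m for _ in range(n)]
--
--     for i in range(m):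
--         for j in range(n):
--             new_box[j][m - 1 - i] = boxGrid[i][j]
--
--     return new_box
-- ===== SOURCE B (Python) =====
-- from typing import List
--
-- def _settle(cells):
--     # wall-free run: stones flush right; everything else keeps its slot unless overwritten
--     c = cells.count('#')
--     return ['.' if v == '#' else v for v in cells[:len(cells) - c]] + ['#'] * c
--
-- def rotateTheBox(boxGrid: List[List[str]]) -> List[List[str]]:
--     n = len(boxGrid[0])
--     for row in boxGrid:
--         out = []
--         seg = []
--         for v in row[:n]:
--             if v == '*':
--                 out += _settle(seg) + ['*']
--                 seg = []
--             else:
--                 seg.append(v)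
--         row[:n] = out + _settle(seg)
--     return [list(col) for col in zip(*(row[:n] for row in reversed(boxGrid)))]
-- ===== Notes on version B (the rewrite author's own statement) =====
-- stated objective: alternative
-- what changed: Gravity is computed by splitting each row into wall-bounded runs and rewriting each run from its stone count (dot-mapped prefix + '#' block) instead of A's stateful two-pointer write sweep, and the rotation is built as a transpose of the reversed rows (zip) instead of index-assignment into a preallocated grid.
import Mathlib
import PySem

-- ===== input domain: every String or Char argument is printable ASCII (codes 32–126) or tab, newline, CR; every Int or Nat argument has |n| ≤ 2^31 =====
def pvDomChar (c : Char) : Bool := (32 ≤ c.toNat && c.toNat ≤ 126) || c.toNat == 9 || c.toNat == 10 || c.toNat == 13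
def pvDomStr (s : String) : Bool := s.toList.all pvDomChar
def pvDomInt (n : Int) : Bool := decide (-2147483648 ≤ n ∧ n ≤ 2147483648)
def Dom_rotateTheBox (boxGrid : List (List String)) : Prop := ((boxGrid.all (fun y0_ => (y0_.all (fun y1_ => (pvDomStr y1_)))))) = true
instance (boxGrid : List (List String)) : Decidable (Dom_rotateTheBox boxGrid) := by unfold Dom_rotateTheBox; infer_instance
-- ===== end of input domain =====

-- B re-implements gravity by rewriting each wall-bounded run from its stone count and builds the
-- rotation as a transpose of the reversed rows; equivalence is about the return value (both Pythons
-- also leave boxGrid itself in the same mutated state).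

-- ===== PORT A =====
-- inner loop of A: for col in reversed(range(n)), state = (row, write)
def gravRowA (n : Nat) (row : List String) : List String :=
  ((List.range n).reverse.foldl
    (fun (st : List String × Nat) col =>
      let v := st.1.getD col ""
      if v = "*" then (st.1, col - 1)
      else if v = "#" then ((st.1.set col ".").set st.2 "#", st.2 - 1)
      else st)
    (row, n - 1)).1

def rotateTheBox (boxGrid : List (List String)) : List (List String) :=
  let m := boxGrid.length
  let n := (boxGrid.headD []).length
  let g := boxGrid.map (gravRowA n)
  (List.range m).foldl
    (fun nb i =>
      (List.range n).foldl
        (fun nb j => nb.set j ((nb.getD j []).set (m - 1 - i) ((g.getD i []).getD j "")))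
        nb)
    (List.replicate n (List.replicate m ""))

-- ===== PORT B =====
-- settle of a wall-free run: stones flush right, everything else keeps its slot unless overwritten
def settleRun (cells : List String) : List String :=
  let c := cells.count "#"
  ((cells.take (cells.length - c)).map (fun v => if v = "#" then "." else v)) ++ List.replicate c "#"

-- the single pass over row[:n] accumulating (finished part, current run)
def gravRowB (n : Nat) (row : List String) : List String :=
  let fin := (row.take n).foldl
    (fun (st : List String × List String) v =>
      if v = "*" then (st.1 ++ settleRun st.2 ++ ["*"], [])
      else (st.1, st.2 ++ [v]))
    ([], [])
  fin.1 ++ settleRun fin.2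

def rotateTheBox_alt (boxGrid : List (List String)) : List (List String) :=
  let n := (boxGrid.headD []).length
  let g := boxGrid.reverse.map (fun row => gravRowB n row)
  -- zip(*g) truncates to the shortest row (and yields [] when g is empty)
  let cols := ((g.map List.length).min?).getD 0
  (List.range cols).map (fun j => g.map (fun r => r.getD j ""))

-- ===== PRECONDITION & SPEC =====
-- Pre_ excludes exactly the inputs where Python A raises IndexError: the empty grid (boxGrid[0]),
-- and grids with a row shorter than row 0 (row[col] / boxGrid[i][j]).
def Pre_rotateTheBox (boxGrid : List (List String)) : Prop :=
  boxGrid ≠ [] ∧ ∀ row ∈ boxGrid, (boxGrid.headD []).length ≤ row.length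
instance (boxGrid : List (List String)) : Decidable (Pre_rotateTheBox boxGrid) := by
  unfold Pre_rotateTheBox; infer_instance

def pvWitness_rotateTheBox : List (List String) :=
  [["#", ".", "*", "."], [".", "#", "#", "*"], ["#", ".", ".", "."]]

def Spec_rotateTheBox (boxGrid : List (List String)) (out : List (List String)) : Prop :=
  out = rotateTheBox_alt boxGrid
instance (boxGrid : List (List String)) (out : List (List String)) : Decidable (Spec_rotateTheBox boxGrid out) := by
  unfold Spec_rotateTheBox; infer_instance

-- ===== CLAIM (what is proved, stated in full; the proofs are below) =====
def Claim_equal_rotateTheBox : Prop := ∀ (boxGrid : List (List String)), Dom_rotateTheBox boxGrid → Pre_rotateTheBox boxGrid → Spec_rotateTheBox boxGrid (rotateTheBox boxGrid)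

-- ===== LEMMAS AND PROOFS =====

-- the exact final form of one row: split on "*", settle each run
def segAll (s : List String) : List String :=
  if h : s.dropWhile (fun v => v ≠ "*") = [] then settleRun s
  else settleRun (s.takeWhile (fun v => v ≠ "*")) ++ "*" :: segAll (s.dropWhile (fun v => v ≠ "*")).tail
termination_by s.length
decreasing_by
  have h1 : (s.dropWhile (fun v => v ≠ "*")).length ≤ s.length :=
    (List.dropWhile_sublist _).length_le
  cases hd : s.dropWhile (fun v => v ≠ "*") with
  | nil => exact absurd hd h
  | cons a t => rw [hd] at h1; simp at h1 ⊢; omega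

theorem settleRun_length (s : List String) : (settleRun s).length = s.length := by
  have hc := List.count_le_length (l := s) (a := "#")
  simp [settleRun]
  omega

theorem settleRun_nil : settleRun [] = [] := rfl

theorem segAll_length (s : List String) : (segAll s).length = s.length := by
  induction s using segAll.induct with
  | case1 s h => rw [segAll, dif_pos h]; exact settleRun_length s
  | case2 s h ih =>
    rw [segAll, dif_neg h]
    have hsplit := List.takeWhile_append_dropWhile (p := fun v => decide (v ≠ "*")) (l := s)
    cases hd : s.dropWhile (fun v => decide (v ≠ "*")) with
    | nil => exact absurd hd h
    | cons a t =>
      rw [hd] at ih hsplit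
      have : s.length = (s.takeWhile (fun v => decide (v ≠ "*"))).length + (a :: t).length := by
        rw [← List.length_append, hsplit]
      simp only [List.length_append, List.length_cons, settleRun_length, List.tail_cons] at *
      omega

theorem segAll_wallfree (s : List String) (h : ∀ v ∈ s, v ≠ "*") : segAll s = settleRun s := by
  rw [segAll, dif_pos]
  rw [List.dropWhile_eq_nil_iff]
  intro x hx
  simpa using h x hx

theorem takeWhile_wall (u t : List String) (h : ∀ v ∈ u, v ≠ "*") :
    (u ++ "*" :: t).takeWhile (fun v => decide (v ≠ "*")) = u := by
  induction u with
  | nil => simp [List.takeWhile]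
  | cons a u ih =>
    have ha : a ≠ "*" := h a (by simp)
    simp only [List.cons_append, List.takeWhile_cons, decide_eq_true_eq, ha, if_pos, if_true]
    rw [if_pos ha, ih (fun v hv => h v (by simp [hv]))]

theorem dropWhile_wall (u t : List String) (h : ∀ v ∈ u, v ≠ "*") :
    (u ++ "*" :: t).dropWhile (fun v => decide (v ≠ "*")) = "*" :: t := by
  induction u with
  | nil => simp [List.dropWhile]
  | cons a u ih =>
    have ha : a ≠ "*" := h a (by simp)
    simp only [List.cons_append, List.dropWhile_cons, decide_eq_true_eq]
    rw [if_pos ha]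
    exact ih (fun v hv => h v (by simp [hv]))

theorem segAll_split (u t : List String) (h : ∀ v ∈ u, v ≠ "*") :
    segAll (u ++ "*" :: t) = settleRun u ++ "*" :: segAll t := by
  rw [segAll, dif_neg (by rw [dropWhile_wall u t h]; simp)]
  rw [dropWhile_wall u t h, takeWhile_wall u t h]
  simp

-- rest is empty or starts with a wall
theorem segAll_nil : segAll [] = [] := by
  rw [segAll, dif_pos (by simp)]
  rfl

theorem segAll_wall_cons (t : List String) : segAll ("*" :: t) = "*" :: segAll t := by
  have := segAll_split [] t (by simp)
  simpa [settleRun_nil] using this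

theorem segAll_glue (u rest : List String) (hu : ∀ v ∈ u, v ≠ "*")
    (hrest : rest = [] ∨ ∃ t, rest = "*" :: t) :
    segAll (u ++ rest) = settleRun u ++ segAll rest := by
  rcases hrest with h | ⟨t, h⟩
  · subst h; rw [List.append_nil, segAll_wallfree u hu, segAll_nil, List.append_nil]
  · subst h; rw [segAll_split u t hu, segAll_wall_cons]

-- ---------- B side ----------

theorem B_fold (l : List String) : ∀ out seg, (∀ v ∈ seg, v ≠ "*") →
    (l.foldl (fun (st : List String × List String) v =>
        if v = "*" then (st.1 ++ settleRun st.2 ++ ["*"], [])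
        else (st.1, st.2 ++ [v])) (out, seg)).1
      ++ settleRun (l.foldl (fun (st : List String × List String) v =>
        if v = "*" then (st.1 ++ settleRun st.2 ++ ["*"], [])
        else (st.1, st.2 ++ [v])) (out, seg)).2
    = out ++ segAll (seg ++ l) := by
  induction l with
  | nil => intro out seg hseg; simpa using (segAll_wallfree seg hseg).symm
  | cons v l ih =>
    intro out seg hseg
    by_cases hv : v = "*"
    · subst hv
      rw [List.foldl_cons, if_pos rfl]
      rw [ih (out ++ settleRun seg ++ ["*"]) [] (by simp)]
      rw [show seg ++ "*" :: l = seg ++ "*" :: ([] ++ l) by simp]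
      rw [segAll_split seg ([] ++ l) hseg]
      simp
    · rw [List.foldl_cons, if_neg hv]
      have hseg' : ∀ x ∈ seg ++ [v], x ≠ "*" := by
        intro x hx
        rcases List.mem_append.1 hx with h | h
        · exact hseg x h
        · rw [List.mem_singleton.1 h]; exact hv
      rw [ih out (seg ++ [v]) hseg']
      simp

theorem gravRowB_eq_segAll (n : Nat) (row : List String) :
    gravRowB n row = segAll (row.take n) := by
  have := B_fold (row.take n) [] [] (by simp)
  simpa [gravRowB] using this

-- ---------- A side ----------

theorem set_len_append {α : Type} (a b : List α) (x y : α) :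
    (a ++ y :: b).set a.length x = a ++ x :: b := by
  induction a with
  | nil => rfl
  | cons h t ih => simp [ih]

theorem getD_append_len {α : Type} (a b : List α) (y d : α) :
    (a ++ y :: b).getD a.length d = y := by
  induction a with
  | nil => rfl
  | cons h t ih => simpa using ih

theorem getD_append_left {α : Type} [Inhabited α] (a b : List α) (i : Nat) (h : i < a.length) (d : α) :
    (a ++ b).getD i d = a.getD i d := by
  simp [List.getD, List.getElem?_append_left h]

-- generic small helpers
theorem set_append_add {α : Type} (a b : List α) (i : Nat) (x : α) :
    (a ++ b).set (a.length + i) x = a ++ b.set i x := by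
  induction a with
  | nil => simp
  | cons h t ih => simpa [Nat.succ_add] using ih

theorem getD_set_eq {α : Type} (l : List α) (i : Nat) (x d : α) (h : i < l.length) :
    (l.set i x).getD i d = x := by
  simp [List.getD, h]

theorem getD_set_ne {α : Type} (l : List α) (i j : Nat) (x d : α) (h : i ≠ j) :
    (l.set i x).getD j d = l.getD j d := by
  simp [List.getD, h]

theorem getD_of_le {α : Type} (l : List α) (i : Nat) (d : α) (h : l.length ≤ i) :
    l.getD i d = d := by
  simp [List.getD, List.getElem?_eq_none_iff.2 h]

-- settleRun cons laws
theorem settle_cons_other (v : String) (u : List String) (hv : v ≠ "#") :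
    settleRun (v :: u) = v :: settleRun u := by
  have hc : u.count "#" ≤ u.length := List.count_le_length
  have hcount : (v :: u).count "#" = u.count "#" := by
    simp [List.count_cons, hv]
  simp only [settleRun, hcount, List.length_cons]
  rw [show u.length + 1 - u.count "#" = (u.length - u.count "#") + 1 from by omega]
  rw [List.take_succ_cons]
  simp [hv]

theorem count_cons_hash (u : List String) : ("#" :: u).count "#" = u.count "#" + 1 := by
  simp [List.count_cons]

-- the '#' write step: dropping a stone into the first free slot of the settled run
theorem settle_hash_set (u X : List String) :
    ("." :: (settleRun u ++ X)).set (u.length - u.count "#") "#" = settleRun ("#" :: u) ++ X := by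
  have hc : u.count "#" ≤ u.length := List.count_le_length
  cases hj : u.length - u.count "#" with
  | zero =>
    have : settleRun ("#" :: u) = List.replicate (u.count "#" + 1) "#" := by
      simp only [settleRun, count_cons_hash, List.length_cons]
      rw [show u.length + 1 - (u.count "#" + 1) = 0 from by omega]
      simp
    rw [this]
    have hsu : settleRun u = List.replicate (u.count "#") "#" := by
      simp only [settleRun]
      rw [hj]
      simp
    rw [hsu]
    simp [List.replicate_succ]
  | succ j' =>
    have hj' : j' < u.length := by omega
    have htake : u.take (j' + 1) = u.take j' ++ [u[j']] :=
      List.take_succ_eq_append_getElem hj'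
    have hsu : settleRun u
        = ((u.take j').map (fun v => if v = "#" then "." else v))
          ++ (if u[j'] = "#" then "." else u[j']) :: List.replicate (u.count "#") "#" := by
      simp only [settleRun]
      rw [hj, htake, List.map_append]
      simp only [List.map_cons, List.map_nil, List.append_assoc, List.cons_append, List.nil_append]
    have hsh : settleRun ("#" :: u)
        = "." :: (((u.take j').map (fun v => if v = "#" then "." else v))
          ++ List.replicate (u.count "#" + 1) "#") := by
      simp only [settleRun, count_cons_hash, List.length_cons]
      rw [show u.length + 1 - (u.count "#" + 1) = j' + 1 from by omega]
      rw [List.take_succ_cons]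
      simp
    rw [hsu, hsh]
    have hlen : ((u.take j').map (fun v => if v = "#" then "." else v)).length = j' := by
      simp [List.length_take]; omega
    rw [List.set_cons_succ]
    rw [show (List.map (fun v => if v = "#" then "." else v) (List.take j' u) ++
          (if u[j'] = "#" then "." else u[j']) :: List.replicate (u.count "#") "#") ++ X
        = List.map (fun v => if v = "#" then "." else v) (List.take j' u) ++
          (if u[j'] = "#" then "." else u[j']) :: (List.replicate (u.count "#") "#" ++ X) from by simp]
    have hset := set_len_append (List.map (fun v => if v = "#" then "." else v) (List.take j' u))
      (List.replicate (u.count "#") "#" ++ X) "#" (if u[j'] = "#" then "." else u[j'])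
    rw [hlen] at hset
    rw [hset]
    simp [List.replicate_succ]

-- A's inner loop, named (definitionally the lambda in gravRowA)
def Astep : List String × Nat → Nat → List String × Nat :=
  fun st col =>
    let v := st.1.getD col ""
    if v = "*" then (st.1, col - 1)
    else if v = "#" then ((st.1.set col ".").set st.2 "#", st.2 - 1)
    else st

theorem Astep_eq (r : List String) (w col : Nat) :
    Astep (r, w) col =
      if r.getD col "" = "*" then (r, col - 1)
      else if r.getD col "" = "#" then ((r.set col ".").set w "#", w - 1)
      else (r, w) := rfl

-- main invariant induction for A's sweep: after processing cols n-1..k the row is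
-- take k ++ settled open run ++ finalized rest ++ drop n, and w points at the next free slot
theorem A_go (row0 : List String) (n : Nat) (hn : n ≤ row0.length) :
    ∀ (k : Nat) (u rest : List String) (w : Nat) (r : List String),
    k + u.length + rest.length = n →
    (row0.take n).drop k = u ++ rest →
    (∀ v ∈ u, v ≠ "*") →
    (rest = [] ∨ ∃ t, rest = "*" :: t) →
    r = row0.take k ++ settleRun u ++ segAll rest ++ row0.drop n →
    (0 < k → w + 1 = k + (u.length - u.count "#")) →
    ((List.range k).reverse.foldl Astep (r, w)).1 = segAll (row0.take n) ++ row0.drop n := by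
  intro k
  induction k with
  | zero =>
    intro u rest w r hcnt hdec hu hrest hr hw
    simp only [List.range_zero, List.reverse_nil, List.foldl_nil]
    rw [hr]
    have hdec0 : row0.take n = u ++ rest := by simpa using hdec
    rw [hdec0, segAll_glue u rest hu hrest]
    simp
  | succ k ih =>
    intro u rest w r hcnt hdec hu hrest hr hw
    have hkn : k < n := by omega
    have hkr : k < row0.length := lt_of_lt_of_le hkn hn
    have hktk : (row0.take k).length = k := by simp [List.length_take]; omega
    have htk1 : row0.take (k + 1) = row0.take k ++ [row0[k]] :=
      List.take_succ_eq_append_getElem hkr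
    have hrev : (List.range (k + 1)).reverse = k :: (List.range k).reverse := by
      rw [List.range_succ]; simp
    rw [hrev, List.foldl_cons]
    -- value read at position k
    have hv0 : r.getD k "" = row0[k] := by
      have h := getD_append_len (row0.take k) (settleRun u ++ segAll rest ++ row0.drop n) (row0[k]) ""
      rw [hktk] at h
      rw [hr, htk1]
      simpa only [List.append_assoc, List.singleton_append] using h
    have hdec' : (row0.take n).drop k = row0[k] :: (u ++ rest) := by
      have hlt : k < (row0.take n).length := by simp [List.length_take]; omega
      have h2 := List.drop_eq_getElem_cons hlt
      rw [h2, List.getElem_take, hdec]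
    by_cases h1 : row0[k] = "*"
    · rw [Astep_eq, hv0, if_pos h1]
      apply ih [] ("*" :: (u ++ rest)) (k - 1) r
      · simp at hcnt ⊢; omega
      · rw [hdec', h1]; simp
      · simp
      · exact Or.inr ⟨u ++ rest, rfl⟩
      · rw [hr, htk1, h1, settleRun_nil, segAll_wall_cons, segAll_glue u rest hu hrest]
        simp
      · intro _; simp; omega
    · by_cases h2 : row0[k] = "#"
      · rw [Astep_eq, hv0, if_neg h1, if_pos h2]
        have hcle : u.count "#" ≤ u.length := List.count_le_length
        have hwv : w = k + (u.length - u.count "#") := by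
          have := hw (Nat.succ_pos k); omega
        apply ih ("#" :: u) rest (w - 1) ((r.set k ".").set w "#")
        · simp at hcnt ⊢; omega
        · rw [hdec', h2]; simp
        · intro v hv
          rcases List.mem_cons.1 hv with h | h
          · rw [h]; decide
          · exact hu v h
        · exact hrest
        · -- the two writes produce the settled run with one more stone
          have hset1 := set_len_append (row0.take k) (settleRun u ++ (segAll rest ++ row0.drop n)) "." "#"
          rw [hktk] at hset1
          have hset2 := set_append_add (row0.take k)
            ("." :: (settleRun u ++ (segAll rest ++ row0.drop n))) (u.length - u.count "#") "#"
          rw [hktk] at hset2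
          rw [hr, htk1, h2]
          rw [show row0.take k ++ ["#"] ++ settleRun u ++ segAll rest ++ row0.drop n
                = row0.take k ++ "#" :: (settleRun u ++ (segAll rest ++ row0.drop n)) from by simp]
          rw [hset1, hwv, hset2, settle_hash_set]
          simp
        · intro _
          have hwpos : 0 < w := by omega
          rw [count_cons_hash]
          simp
          omega
      · rw [Astep_eq, hv0, if_neg h1, if_neg h2]
        have hcle : u.count "#" ≤ u.length := List.count_le_length
        apply ih (row0[k] :: u) rest w r
        · simp at hcnt ⊢; omega
        · rw [hdec']; simp
        · intro v hv
          rcases List.mem_cons.1 hv with h | h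
          · rw [h]; exact h1
          · exact hu v h
        · exact hrest
        · rw [hr, htk1, settle_cons_other _ _ h2]
          simp only [List.append_assoc, List.singleton_append, List.cons_append, List.nil_append]
        · intro _
          have := hw (Nat.succ_pos k)
          have hcv : (row0[k] :: u).count "#" = u.count "#" := by
            simp [List.count_cons, h2]
          rw [hcv]
          simp only [List.length_cons]
          try omega

theorem gravRowA_eq (n : Nat) (row : List String) (hn : n ≤ row.length) :
    gravRowA n row = segAll (row.take n) ++ row.drop n := by
  have h0 : gravRowA n row = ((List.range n).reverse.foldl Astep (row, n - 1)).1 := rfl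
  rw [h0]
  apply A_go row n hn n [] [] (n - 1) row
  · simp
  · have hlt : (row.take n).length = n := by simp [List.length_take]; omega
    rw [show ((row.take n).drop n) = (row.take n).drop ((row.take n).length) from by rw [hlt]]
    simp
  · simp
  · exact Or.inl rfl
  · rw [settleRun_nil, segAll_nil]; simp
  · intro h; simp; omega

theorem grav_getD (n : Nat) (row : List String) (hn : n ≤ row.length) (j : Nat) (hj : j < n) :
    (gravRowA n row).getD j "" = (gravRowB n row).getD j "" := by
  rw [gravRowA_eq n row hn, gravRowB_eq_segAll]
  exact getD_append_left _ _ j (by rw [segAll_length, List.length_take]; omega) ""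

-- ---------- rotation ----------

-- A's outer rotation loop, named (definitionally the lambda in rotateTheBox)
def outerF (m n : Nat) (E : Nat → Nat → String) : List (List String) → Nat → List (List String) :=
  fun nb i => (List.range n).foldl (fun nb j => nb.set j ((nb.getD j []).set (m - 1 - i) (E i j))) nb

theorem inner_len (p : Nat) (f : Nat → String) :
    ∀ (t : Nat) (nb : List (List String)),
    ((List.range t).foldl (fun nb j => nb.set j ((nb.getD j []).set p (f j))) nb).length
      = nb.length := by
  intro t
  induction t with
  | zero => intro nb; simp
  | succ t ih =>
    intro nb
    rw [List.range_succ, List.foldl_append, List.foldl_cons, List.foldl_nil, List.length_set]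
    exact ih nb

theorem inner_getD (p : Nat) (f : Nat → String) :
    ∀ (t : Nat) (nb : List (List String)) (j' : Nat),
    ((List.range t).foldl (fun nb j => nb.set j ((nb.getD j []).set p (f j))) nb).getD j' []
      = if j' < t then (nb.getD j' []).set p (f j') else nb.getD j' [] := by
  intro t
  induction t with
  | zero => intro nb j'; simp
  | succ t ih =>
    intro nb j'
    rw [List.range_succ, List.foldl_append, List.foldl_cons, List.foldl_nil]
    by_cases hjt : j' = t
    · subst hjt
      by_cases hl : j' < nb.length
      · rw [getD_set_eq _ _ _ _ (by rw [inner_len p f j' nb]; exact hl)]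
        rw [ih nb j']
        simp
      · push_neg at hl
        rw [List.set_eq_of_length_le (by rw [inner_len p f j' nb]; exact hl)]
        rw [ih nb j']
        rw [if_neg (lt_irrefl j'), if_pos (Nat.lt_succ_self j')]
        rw [getD_of_le _ _ _ hl]
        simp
    · rw [getD_set_ne _ _ _ _ _ (fun h => hjt (h.symm))]
      rw [ih nb j']
      split_ifs with ha hb hb
      · rfl
      · omega
      · omega
      · rfl

theorem outer_facts (m n : Nat) (E : Nat → Nat → String) :
    ∀ t, t ≤ m →
    (((List.range t).foldl (outerF m n E) (List.replicate n (List.replicate m ""))).length = n)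
    ∧ (∀ j, j < n →
        (((List.range t).foldl (outerF m n E) (List.replicate n (List.replicate m ""))).getD j []).length = m)
    ∧ (∀ j, j < n → ∀ k, k < m →
        (((List.range t).foldl (outerF m n E) (List.replicate n (List.replicate m ""))).getD j []).getD k ""
          = if m - t ≤ k then E (m - 1 - k) j else "") := by
  intro t
  induction t with
  | zero =>
    intro _
    rw [List.range_zero]
    simp only [List.foldl_nil]
    have hrep : ∀ j, j < n → (List.replicate n (List.replicate m "")).getD j [] = List.replicate m "" := by
      intro j hj; simp [List.getD, hj]
    refine ⟨by simp, ?_, ?_⟩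
    · intro j hj; rw [hrep j hj]; simp
    · intro j hj k hk
      rw [hrep j hj, if_neg (by omega)]
      simp [List.getD, hk]
  | succ t ih =>
    intro ht
    obtain ⟨ihl, ihcl, ihe⟩ := ih (by omega)
    rw [List.range_succ, List.foldl_append, List.foldl_cons, List.foldl_nil]
    have hstep : ∀ nb, outerF m n E nb t
        = (List.range n).foldl (fun nb j => nb.set j ((nb.getD j []).set (m - 1 - t) (E t j))) nb :=
      fun _ => rfl
    rw [hstep]
    refine ⟨?_, ?_, ?_⟩
    · rw [inner_len]; exact ihl
    · intro j hj
      rw [inner_getD, if_pos hj, List.length_set]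
      exact ihcl j hj
    · intro j hj k hk
      rw [inner_getD, if_pos hj]
      by_cases hkt : k = m - 1 - t
      · rw [hkt, getD_set_eq _ _ _ _ (by rw [ihcl j hj]; omega)]
        rw [if_pos (by omega)]
        rw [show m - 1 - (m - 1 - t) = t from by omega]
      · rw [getD_set_ne _ _ _ _ _ (fun h => hkt (h.symm))]
        rw [ihe j hj k hk]
        by_cases hc1 : m - t ≤ k
        · rw [if_pos hc1, if_pos (by omega)]
        · rw [if_neg hc1, if_neg (by omega)]

theorem gravRowB_length (n : Nat) (row : List String) :
    (gravRowB n row).length = (row.take n).length := by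
  rw [gravRowB_eq_segAll, segAll_length]

theorem foldl_min_replicate (c : Nat) : ∀ m, List.foldl min c (List.replicate m c) = c := by
  intro m
  induction m with
  | zero => rfl
  | succ m ih => simpa [List.replicate_succ] using ih

theorem min?_replicate (m c : Nat) (h : m ≠ 0) : (List.replicate m c).min? = some c := by
  cases m with
  | zero => exact absurd rfl h
  | succ m =>
    rw [List.replicate_succ]
    simp only [List.min?_cons']
    rw [foldl_min_replicate c m]

theorem rotate_eq (boxGrid : List (List String)) (hpre : Pre_rotateTheBox boxGrid) :
    rotateTheBox boxGrid = rotateTheBox_alt boxGrid := by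
  obtain ⟨hne, hrows⟩ := hpre
  have hA : rotateTheBox boxGrid
      = (List.range boxGrid.length).foldl
          (outerF boxGrid.length (boxGrid.headD []).length
            (fun i j => ((boxGrid.map (gravRowA (boxGrid.headD []).length)).getD i []).getD j ""))
          (List.replicate (boxGrid.headD []).length (List.replicate boxGrid.length "")) := rfl
  have hgrep : (boxGrid.reverse.map (fun row => gravRowB (boxGrid.headD []).length row)).map List.length
      = List.replicate boxGrid.length (boxGrid.headD []).length := by
    rw [show boxGrid.length
          = ((boxGrid.reverse.map (fun row => gravRowB (boxGrid.headD []).length row)).map List.length).length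
        from by simp]
    apply List.eq_replicate_of_mem
    intro x hx
    rcases List.mem_map.1 hx with ⟨r, hr1, hr2⟩
    rcases List.mem_map.1 hr1 with ⟨row, hrow1, hrow2⟩
    have hle : (boxGrid.headD []).length ≤ row.length := hrows row (List.mem_reverse.1 hrow1)
    rw [← hr2, ← hrow2, gravRowB_length, List.length_take]
    omega
  have hlenrep : ((boxGrid.reverse.map (fun row => gravRowB (boxGrid.headD []).length row)).map List.length).length
      = boxGrid.length := by simp
  have hB : rotateTheBox_alt boxGrid
      = (List.range ((((boxGrid.reverse.map (fun row => gravRowB (boxGrid.headD []).length row)).map List.length).min?).getD 0)).map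
          (fun j => (boxGrid.reverse.map (fun row => gravRowB (boxGrid.headD []).length row)).map
            (fun r => r.getD j "")) := rfl
  have hm0 : boxGrid.length ≠ 0 := by
    intro h; exact hne (List.eq_nil_of_length_eq_zero h)
  rw [hgrep, min?_replicate _ _ hm0] at hB
  simp only [Option.getD_some] at hB
  obtain ⟨hl, hcl, he⟩ := outer_facts boxGrid.length (boxGrid.headD []).length
    (fun i j => ((boxGrid.map (gravRowA (boxGrid.headD []).length)).getD i []).getD j "")
    boxGrid.length le_rfl
  rw [hA, hB]
  apply List.ext_getElem
  · rw [hl]; simp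
  · intro j h1 h2
    have hjn : j < (boxGrid.headD []).length := by simpa using h2
    rw [List.getElem_map, List.getElem_range]
    rw [← List.getD_eq_getElem _ [] h1]
    apply List.ext_getElem
    · rw [hcl j hjn]
      simp
    · intro k hk1 hk2
      have hkm : k < boxGrid.length := by simpa using hk2
      simp only [List.getElem_map, List.getElem_reverse]
      rw [← List.getD_eq_getElem _ "" hk1]
      rw [he j hjn k hkm, if_pos (by omega)]
      have hmem : boxGrid[boxGrid.length - 1 - k] ∈ boxGrid := List.getElem_mem _
      have hrow : (boxGrid.headD []).length ≤ (boxGrid[boxGrid.length - 1 - k]).length :=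
        hrows _ hmem
      have hmap : (boxGrid.map (gravRowA (boxGrid.headD []).length)).getD (boxGrid.length - 1 - k) []
          = gravRowA (boxGrid.headD []).length (boxGrid[boxGrid.length - 1 - k]) := by
        simp [List.getD, List.getElem?_map,
          List.getElem?_eq_getElem (by omega : boxGrid.length - 1 - k < boxGrid.length)]
      rw [hmap]
      exact grav_getD _ _ hrow j hjn

-- ===== VERDICT (by name: the statement is the Claim_ definition above) =====
theorem rotateTheBox_spec : Claim_equal_rotateTheBox := by
  intro boxGrid _ hpre
  exact rotate_eq boxGrid hpre
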